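-- pv_equiv track=rewrite | github.com/ai-computing/aicomp | fasop/config.py | get_cluster_info_from_spec
-- ===== SOURCE A (Python) =====
-- def get_cluster_info_from_spec(cluster: dict) -> dict:
--     """
--     Convert cluster specification to cluster_info format used internally.
--
--     Args:
--         cluster: {gpu_type: count} e.g., {"A40": 8, "A100": 1}
--
--     Returns:
--         cluster_info dict with node indices as keys and '0'/'1' markers as values
--         '1' = A100 (high-end), '0' = other GPUs
--     """
--     cluster_info = {}
--     node_idx = 0
--
--     # Process A100 first (marker '1')
--     if "A100" in cluster:
--         for _ in range(cluster["A100"]):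
--             cluster_info[node_idx] = "1"
--             node_idx += 1
--
--     # Process other GPUs (marker '0')
--     for gpu_type, count in cluster.items():
--         if gpu_type != "A100":
--             for _ in range(count):
--                 cluster_info[node_idx] = "0"
--                 node_idx += 1
--
--     return cluster_info
-- ===== SOURCE B (Python) =====
-- def get_cluster_info_from_spec(cluster: dict) -> dict:
--     """Closed form: count the A100s and the rest, then the key alone decides the marker."""
--     n_a100 = cluster.get('A100', 0)
--     total = n_a100 + sum(count for gpu_type, count in cluster.items() if gpu_type != 'A100')
--     return {i: '1' if i < n_a100 else '0' for i in range(total)}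
-- ===== Notes on version B (the rewrite author's own statement) =====
-- stated objective: simpler
-- what changed: Replaces A's state machine (a dict filled entry-by-entry by a running node_idx counter through nested range loops) with a closed-form computation: two aggregate counts (A100s and the rest) and a single comprehension in which each key's marker is decided by the arithmetic comparison i < n_a100, no marker sequence or counter ever built.
-- outside the precondition, e.g. on get_cluster_info_from_spec({'A100': -1, 'A40': 2}): A returns {0: '0', 1: '0'}, B returns {0: '0'}
import Mathlib
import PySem

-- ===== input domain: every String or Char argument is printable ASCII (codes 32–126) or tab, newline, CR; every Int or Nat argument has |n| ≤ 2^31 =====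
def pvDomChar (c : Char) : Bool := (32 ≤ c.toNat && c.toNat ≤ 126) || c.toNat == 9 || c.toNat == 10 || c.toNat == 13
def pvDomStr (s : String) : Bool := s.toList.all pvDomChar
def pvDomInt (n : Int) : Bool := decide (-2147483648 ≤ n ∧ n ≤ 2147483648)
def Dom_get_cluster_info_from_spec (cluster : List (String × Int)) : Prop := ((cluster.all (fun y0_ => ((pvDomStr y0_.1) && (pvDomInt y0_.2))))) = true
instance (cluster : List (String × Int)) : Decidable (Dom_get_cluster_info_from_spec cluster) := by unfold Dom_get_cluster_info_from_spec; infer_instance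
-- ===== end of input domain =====

-- B replaces A's dict-filling counter state machine with a closed form: two aggregate
-- counts and one comprehension where the comparison i < n_a100 decides each marker.
-- Objective: simpler.

-- ===== PORT A =====
def get_cluster_info_from_spec (cluster : List (String × Int)) : List (Int × String) :=
  -- cluster_info = {}; node_idx = 0
  let init : PySem.Dict Int String × Int := (PySem.Dict.empty, 0)
  -- if "A100" in cluster: for _ in range(cluster["A100"]): cluster_info[node_idx] = "1"; node_idx += 1
  let st1 : PySem.Dict Int String × Int :=
    if (PySem.Dict.mk cluster).contains "A100" then
      (PySem.List.pyRange 0 (((PySem.Dict.mk cluster).get? "A100").getD 0) 1).foldl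
        (fun st _ => (st.1.insert st.2 "1", st.2 + 1)) init
    else init
  -- for gpu_type, count in cluster.items(): if gpu_type != "A100": for _ in range(count): …
  let st2 : PySem.Dict Int String × Int :=
    cluster.foldl
      (fun st p =>
        if p.1 ≠ "A100" then
          (PySem.List.pyRange 0 p.2 1).foldl
            (fun st' _ => (st'.1.insert st'.2 "0", st'.2 + 1)) st
        else st) st1
  st2.1.items

-- ===== PORT B =====
def get_cluster_info_from_spec_alt (cluster : List (String × Int)) : List (Int × String) :=
  -- n_a100 = cluster.get('A100', 0)
  let nA : Int := (PySem.Dict.mk cluster).getD "A100" 0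
  -- total = n_a100 + sum(count for gpu_type, count in cluster.items() if gpu_type != 'A100')
  let total : Int :=
    nA + cluster.foldl (fun acc p => if p.1 ≠ "A100" then acc + p.2 else acc) 0
  -- {i: '1' if i < n_a100 else '0' for i in range(total)}
  (PySem.Dict.ofList
    ((PySem.List.pyRange 0 total 1).map (fun i => (i, if i < nA then "1" else "0")))).items

-- ===== PRECONDITION & SPEC =====
-- Pre_ restricts to the task's natural domain: GPU counts are non-negative (on negative
-- counts A silently treats the count as 0 via range(), a value outside the function's purpose).
def Pre_get_cluster_info_from_spec (cluster : List (String × Int)) : Prop :=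
  ∀ p ∈ cluster, 0 ≤ p.2
instance (cluster : List (String × Int)) : Decidable (Pre_get_cluster_info_from_spec cluster) := by unfold Pre_get_cluster_info_from_spec; infer_instance
def pvWitness_get_cluster_info_from_spec : (List (String × Int)) := [("A100", 1), ("A40", 2)]

def Spec_get_cluster_info_from_spec (cluster : List (String × Int)) (out : List (Int × String)) : Prop := out = get_cluster_info_from_spec_alt cluster
instance (cluster : List (String × Int)) (out : List (Int × String)) : Decidable (Spec_get_cluster_info_from_spec cluster out) := by unfold Spec_get_cluster_info_from_spec; infer_instance

-- ===== CLAIM (what is proved, stated in full; the proofs are below) =====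
def Claim_equal_get_cluster_info_from_spec : Prop := ∀ (cluster : List (String × Int)), Dom_get_cluster_info_from_spec cluster → Pre_get_cluster_info_from_spec cluster → Spec_get_cluster_info_from_spec cluster (get_cluster_info_from_spec cluster)

-- ===== LEMMAS AND PROOFS =====

-- enumerate of a replicate is a constant-valued integer range
theorem enumerate_replicate (k : Nat) (s : Int) (v : String) :
    PySem.List.enumerate (List.replicate k v) s
      = (PySem.List.pyRange s (s + k) 1).map (fun j => (j, v)) := by
  induction k generalizing s with
  | zero => simp [PySem.List.pyRange_one_eq_nil]
  | succ k ih =>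
      have h : s < s + ((k + 1 : Nat) : Int) := by push_cast; omega
      rw [List.replicate_succ, PySem.List.enumerate_cons, ih,
        PySem.List.pyRange_one_cons h, List.map_cons]
      congr 3
      push_cast; ring

-- A's counter loop ignores the range elements; it is the fold inserting keys n, n+1, …
theorem ignore_fold (l : List Int) (d : PySem.Dict Int String) (n : Int) (v : String) :
    l.foldl (fun st (_ : Int) => (st.1.insert st.2 v, st.2 + 1)) (d, n)
      = ((PySem.List.pyRange n (n + l.length) 1).foldl (fun d' j => d'.insert j v) d,
         n + l.length) := by
  induction l generalizing d n with
  | nil => simp [PySem.List.pyRange_one_eq_nil]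
  | cons x t ih =>
      rw [List.foldl_cons]
      dsimp only
      rw [ih]
      have hb : n + 1 + (t.length : Int) = n + ((x :: t).length : Int) := by
        have h1 : (x :: t).length = t.length + 1 := rfl
        omega
      have hlt : n < n + ((x :: t).length : Int) := by
        have h1 : (x :: t).length = t.length + 1 := rfl
        omega
      rw [hb, PySem.List.pyRange_one_cons hlt, List.foldl_cons]

-- keys of a dict whose items are enumerate ms 0 are exactly 0 ≤ j < |ms|
theorem contains_of_enumerate (d : PySem.Dict Int String) (ms : List String)
    (hd : d.items = PySem.List.enumerate ms 0) (j : Int) (hj : (ms.length : Int) ≤ j) :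
    d.contains j = false := by
  rw [PySem.Dict.contains_eq_decide_mem_keys]
  simp only [PySem.Dict.keys, hd, PySem.List.map_fst_enumerate]
  simp [PySem.List.mem_pyRange_one]
  omega

-- one group: fold of A's counter loop over range(c) from (d, |ms|) keeps the invariant
theorem group_step (d : PySem.Dict Int String) (ms : List String) (c : Int) (v : String) (n : Int)
    (hd : d.items = PySem.List.enumerate ms 0) (hn : n = (ms.length : Int)) :
    ((PySem.List.pyRange 0 c 1).foldl (fun st (_ : Int) => (st.1.insert st.2 v, st.2 + 1))
        (d, n))
      = (PySem.Dict.mk (PySem.List.enumerate (ms ++ List.replicate c.toNat v) 0),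
         ((ms ++ List.replicate c.toNat v).length : Int)) := by
  subst hn
  rw [ignore_fold]
  have hlen : ((PySem.List.pyRange 0 c 1).length : Int) = (c.toNat : Int) := by
    rw [PySem.List.length_pyRange_one]; norm_num
  have hfresh : ∀ a ∈ PySem.List.pyRange (ms.length : Int) ((ms.length : Int) + (PySem.List.pyRange 0 c 1).length) 1,
      d.contains a = false := by
    intro a ha
    rw [PySem.List.mem_pyRange_one] at ha
    exact contains_of_enumerate d ms hd a ha.1
  have hnd : (PySem.List.pyRange (ms.length : Int) ((ms.length : Int) + (PySem.List.pyRange 0 c 1).length) 1).Nodup :=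
    PySem.List.nodup_pyRange_one _ _
  have hitems := PySem.Dict.items_foldl_insert_fresh
      (l := PySem.List.pyRange (ms.length : Int) ((ms.length : Int) + (PySem.List.pyRange 0 c 1).length) 1)
      (k := fun j => j) (v := fun _ => v) (d := d) hfresh (by simpa using hnd)
  refine Prod.ext ?_ ?_
  · apply PySem.Dict.ext
    show _ = PySem.List.enumerate (ms ++ List.replicate c.toNat v) 0
    rw [hitems, hd, PySem.List.enumerate_append, enumerate_replicate]
    congr 2; simp [PySem.List.length_pyRange_one]
  · rw [List.length_append, List.length_replicate, hlen]; push_cast; ring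

-- the main loop: A's dict/counter state appends one replicate block of '0's per entry
theorem main_fold (l : List (String × Int)) (d : PySem.Dict Int String) (ms : List String)
    (hd : d.items = PySem.List.enumerate ms 0) :
    (l.foldl
        (fun st p =>
          if p.1 ≠ "A100" then
            (PySem.List.pyRange 0 p.2 1).foldl
              (fun st' (_ : Int) => (st'.1.insert st'.2 "0", st'.2 + 1)) st
          else st) (d, (ms.length : Int))).1.items
      = PySem.List.enumerate
          (l.foldl (fun ms' p => if p.1 ≠ "A100" then ms' ++ List.replicate p.2.toNat "0" else ms') ms) 0 := by
  induction l generalizing d ms with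
  | nil => simpa using hd
  | cons p t ih =>
      rw [List.foldl_cons, List.foldl_cons]
      by_cases hp : p.1 ≠ "A100"
      · rw [if_pos hp, if_pos hp, group_step d ms p.2 "0" (ms.length : Int) hd rfl]
        exact ih _ _ rfl
      · rw [if_neg hp, if_neg hp]
        exact ih d ms hd

-- B's dict comprehension over range(total) has exactly its pairs as items (fresh distinct keys)
theorem ofList_map_pyRange (n : Int) (f : Int → String) :
    (PySem.Dict.ofList ((PySem.List.pyRange 0 n 1).map (fun i => (i, f i)))).items
      = (PySem.List.pyRange 0 n 1).map (fun i => (i, f i)) := by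
  have hfresh : ∀ p ∈ (PySem.List.pyRange 0 n 1).map (fun i => (i, f i)),
      (PySem.Dict.empty : PySem.Dict Int String).contains p.1 = false := by
    intro p _; exact PySem.Dict.contains_empty _
  have hnd : (((PySem.List.pyRange 0 n 1).map (fun i => (i, f i))).map (fun p => p.1)).Nodup := by
    rw [List.map_map]
    simpa [Function.comp_def] using PySem.List.nodup_pyRange_one (0 : Int) n
  have := PySem.Dict.items_foldl_insert_fresh
      (l := (PySem.List.pyRange 0 n 1).map (fun i => (i, f i)))
      (k := fun p => p.1) (v := fun p => p.2) (d := PySem.Dict.empty) hfresh hnd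
  simpa [PySem.Dict.ofList] using this

-- the conditional sum fold shifts its initial accumulator out
theorem sum_fold_shift (l : List (String × Int)) (s : Int) :
    l.foldl (fun acc p => if p.1 ≠ "A100" then acc + p.2 else acc) s
      = s + l.foldl (fun acc p => if p.1 ≠ "A100" then acc + p.2 else acc) 0 := by
  induction l generalizing s with
  | nil => simp
  | cons p t ih =>
      rw [List.foldl_cons, List.foldl_cons]
      by_cases hp : p.1 ≠ "A100"
      · rw [if_pos hp, if_pos hp, ih (s + p.2), ih (0 + p.2)]; ring
      · rw [if_neg hp, if_neg hp, ih s]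

-- the conditional sum of non-negative counts is non-negative
theorem sum_fold_nonneg (l : List (String × Int)) (h : ∀ p ∈ l, 0 ≤ p.2) :
    0 ≤ l.foldl (fun acc p => if p.1 ≠ "A100" then acc + p.2 else acc) (0 : Int) := by
  induction l with
  | nil => simp
  | cons p t ih =>
      rw [List.foldl_cons, sum_fold_shift]
      have hp := h p (List.mem_cons_self)
      have ht := ih (fun q hq => h q (List.mem_cons_of_mem _ hq))
      split_ifs <;> omega

-- with non-negative counts, A's marker accumulation is one replicate block of the total sum
theorem zeros_fold (l : List (String × Int)) (h : ∀ p ∈ l, 0 ≤ p.2) (ms : List String) :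
    l.foldl (fun ms' p => if p.1 ≠ "A100" then ms' ++ List.replicate p.2.toNat "0" else ms') ms
      = ms ++ List.replicate
          (l.foldl (fun acc p => if p.1 ≠ "A100" then acc + p.2 else acc) (0 : Int)).toNat "0" := by
  induction l generalizing ms with
  | nil => simp
  | cons p t ih =>
      have hp := h p (List.mem_cons_self)
      have ht : ∀ q ∈ t, 0 ≤ q.2 := fun q hq => h q (List.mem_cons_of_mem _ hq)
      have hts := sum_fold_nonneg t ht
      rw [List.foldl_cons, List.foldl_cons]
      by_cases hc : p.1 ≠ "A100"
      · rw [if_pos hc, if_pos hc, ih ht, List.append_assoc, ← List.replicate_add,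
          sum_fold_shift t (0 + p.2)]
        congr 2
        omega
      · rw [if_neg hc, if_neg hc, ih ht]

-- enumerate of a '1'-block followed by a '0'-block is B's thresholded range
theorem enumerate_two_blocks (a z : Int) (ha : 0 ≤ a) (hz : 0 ≤ z) :
    PySem.List.enumerate (List.replicate a.toNat "1" ++ List.replicate z.toNat "0") 0
      = (PySem.List.pyRange 0 (a + z) 1).map (fun i => (i, if i < a then "1" else "0")) := by
  rw [PySem.List.enumerate_append, enumerate_replicate, enumerate_replicate,
    PySem.List.pyRange_one_append 0 a (a + z) ha (by omega), List.map_append]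
  have h1 : (0 : Int) + (a.toNat : Int) = a := by omega
  have h2 : (0 : Int) + ((List.replicate a.toNat "1").length : Int) = a := by
    rw [List.length_replicate]; omega
  rw [h1, h2]
  have h3 : a + (z.toNat : Int) = a + z := by omega
  rw [h3]
  congr 1
  · apply List.map_congr_left
    intro j hj
    rw [PySem.List.mem_pyRange_one] at hj
    rw [if_pos hj.2]
  · apply List.map_congr_left
    intro j hj
    rw [PySem.List.mem_pyRange_one] at hj
    rw [if_neg (by omega)]

-- under Pre_, the looked-up A100 count (first match or 0) is non-negative
theorem getD_mk_nonneg (l : List (String × Int)) (h : ∀ p ∈ l, 0 ≤ p.2) :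
    0 ≤ (PySem.Dict.mk l).getD "A100" 0 := by
  rw [PySem.Dict.getD_eq_get?_getD]
  induction l with
  | nil =>
      show 0 ≤ ((PySem.Dict.empty : PySem.Dict String Int).get? "A100").getD 0
      rw [PySem.Dict.get?_empty]
      simp
  | cons p t ih =>
      have hp := h p (List.mem_cons_self)
      have ht := ih (fun q hq => h q (List.mem_cons_of_mem _ hq))
      rw [show (p :: t) = ((p.1, p.2) :: t) from rfl, PySem.Dict.get?_mk_cons]
      split_ifs with hc
      · simpa using hp
      · exact ht

-- ===== VERDICT (by name: the statement is the Claim_ definition above) =====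
theorem get_cluster_info_from_spec_spec : Claim_equal_get_cluster_info_from_spec := by
  intro cluster _ hpre
  unfold Spec_get_cluster_info_from_spec
  simp only [get_cluster_info_from_spec, get_cluster_info_from_spec_alt]
  rw [ofList_map_pyRange]
  have ha : 0 ≤ (PySem.Dict.mk cluster).getD "A100" 0 := getD_mk_nonneg cluster hpre
  have hz := sum_fold_nonneg cluster hpre
  cases hc : (PySem.Dict.mk cluster).contains "A100" with
  | true =>
      rw [if_pos rfl,
        group_step PySem.Dict.empty [] (((PySem.Dict.mk cluster).get? "A100").getD 0) "1" 0 rfl (by simp),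
        List.nil_append, main_fold cluster _ _ rfl, zeros_fold cluster hpre,
        ← PySem.Dict.getD_eq_get?_getD]
      exact enumerate_two_blocks _ _ ha hz
  | false =>
      have hm := main_fold cluster PySem.Dict.empty [] rfl
      rw [show ((([] : List String)).length : Int) = 0 from rfl] at hm
      rw [PySem.Dict.getD_of_not_contains _ _ hc, if_neg Bool.false_ne_true,
        hm, zeros_fold cluster hpre, List.nil_append]
      have := enumerate_two_blocks 0 _ le_rfl hz
      simpa using this
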